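-- pv_equiv track=rewrite | github.com/JLOLYR/calendario-astral | RespaldoCalendario_28072025/Fun_Astral.py | asignar_elemento
-- ===== SOURCE A (Python) =====
-- def asignar_elemento(signo):
--     elementos = {
--         'Fuego': ['Aries', 'Leo', 'Sagittarius'],
--         'Tierra': ['Taurus', 'Virgo', 'Capricorn'],
--         'Aire': ['Gemini', 'Libra', 'Aquarius'],
--         'Agua': ['Cancer', 'Scorpio', 'Pisces']
--     }
--     for elemento, signos in elementos.items():
--         if signo in signos:
--             return elemento
--     return 'Desconocido'
-- ===== SOURCE B (Python) =====
-- def asignar_elemento(signo):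
--     # The four elements repeat cyclically along the zodiacal order,
--     # so the element is determined by the sign's position modulo 4.
--     zodiaco = ['Aries', 'Taurus', 'Gemini', 'Cancer', 'Leo', 'Virgo',
--                'Libra', 'Scorpio', 'Sagittarius', 'Capricorn', 'Aquarius', 'Pisces']
--     try:
--         i = zodiaco.index(signo)
--     except ValueError:
--         return 'Desconocido'
--     return ('Fuego', 'Tierra', 'Aire', 'Agua')[i % 4]
-- ===== Notes on version B (the rewrite author's own statement) =====
-- stated objective: alternative
-- what changed: B drops the element-to-signs grouping entirely and instead exploits the arithmetic structure of the zodiac: it finds the sign's position in the standard zodiacal order and returns elements[i % 4], since the four elements cycle with period 4 along that order.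
import Mathlib
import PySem

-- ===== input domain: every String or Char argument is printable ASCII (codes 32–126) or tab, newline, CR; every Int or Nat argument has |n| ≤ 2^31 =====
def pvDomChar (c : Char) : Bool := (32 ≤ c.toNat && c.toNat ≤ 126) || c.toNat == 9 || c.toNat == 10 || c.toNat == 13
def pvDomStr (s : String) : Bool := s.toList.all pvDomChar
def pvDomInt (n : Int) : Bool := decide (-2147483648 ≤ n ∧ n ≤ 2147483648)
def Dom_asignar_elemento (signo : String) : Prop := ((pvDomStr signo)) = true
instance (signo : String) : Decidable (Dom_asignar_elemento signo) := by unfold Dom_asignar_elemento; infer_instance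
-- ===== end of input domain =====

-- B replaces A's element→signs group scan by the zodiac's mod-4 element cycle: index in zodiacal order, then elements[i % 4] (alternative algorithm).


-- ===== PORT A =====
-- the dict literal 'elementos' of A, in insertion order
def aeElementos : List (String × List String) :=
  [("Fuego", ["Aries", "Leo", "Sagittarius"]),
   ("Tierra", ["Taurus", "Virgo", "Capricorn"]),
   ("Aire", ["Gemini", "Libra", "Aquarius"]),
   ("Agua", ["Cancer", "Scorpio", "Pisces"])]

-- the 'for elemento, signos in elementos.items(): if signo in signos: return elemento' loop
def aeLoop (items : List (String × List String)) (signo : String) : String :=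
  match items with
  | [] => "Desconocido"
  | (elemento, signos) :: rest =>
    if signos.contains signo then elemento else aeLoop rest signo

def asignar_elemento (signo : String) : String := aeLoop aeElementos signo

-- ===== PORT B =====
-- B's zodiacal order and element cycle
def aeZodiaco : List String :=
  ["Aries", "Taurus", "Gemini", "Cancer", "Leo", "Virgo",
   "Libra", "Scorpio", "Sagittarius", "Capricorn", "Aquarius", "Pisces"]

def aeCiclo : List String := ["Fuego", "Tierra", "Aire", "Agua"]

def asignar_elemento_alt (signo : String) : String :=
  match PySem.List.index? aeZodiaco signo with
  | none => "Desconocido"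
  | some i => aeCiclo.getD (i % 4) "Desconocido"

-- ===== PRECONDITION & SPEC =====
def Spec_asignar_elemento (signo : String) (out : String) : Prop := out = asignar_elemento_alt signo
instance (signo : String) (out : String) : Decidable (Spec_asignar_elemento signo out) := by unfold Spec_asignar_elemento; infer_instance

-- ===== CLAIM =====
def Claim_equal_asignar_elemento : Prop := ∀ (signo : String), Dom_asignar_elemento signo → Spec_asignar_elemento signo (asignar_elemento signo)

-- ===== LEMMAS AND PROOFS =====

-- ===== VERDICT =====
theorem asignar_elemento_spec : Claim_equal_asignar_elemento := by
  intro signo _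
  unfold Spec_asignar_elemento
  by_cases h1 : signo = "Aries";  · subst h1; rfl
  by_cases h2 : signo = "Leo";  · subst h2; rfl
  by_cases h3 : signo = "Sagittarius";  · subst h3; rfl
  by_cases h4 : signo = "Taurus";  · subst h4; rfl
  by_cases h5 : signo = "Virgo";  · subst h5; rfl
  by_cases h6 : signo = "Capricorn";  · subst h6; rfl
  by_cases h7 : signo = "Gemini";  · subst h7; rfl
  by_cases h8 : signo = "Libra";  · subst h8; rfl
  by_cases h9 : signo = "Aquarius";  · subst h9; rfl
  by_cases h10 : signo = "Cancer";  · subst h10; rfl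
  by_cases h11 : signo = "Scorpio";  · subst h11; rfl
  by_cases h12 : signo = "Pisces";  · subst h12; rfl
  have hmem : PySem.List.index? aeZodiaco signo = none := by
    rw [PySem.List.index?_eq_none_iff]
    simp [aeZodiaco, h1, h2, h3, h4, h5, h6, h7, h8, h9, h10, h11, h12]
  have hb : asignar_elemento_alt signo = "Desconocido" := by
    unfold asignar_elemento_alt; rw [hmem]
  have ha : asignar_elemento signo = "Desconocido" := by
    simp [asignar_elemento, aeLoop, aeElementos, h1, h2, h3, h4, h5, h6, h7, h8, h9, h10, h11, h12]
  rw [ha, hb]
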